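-- pv_equiv track=rewrite | github.com/NVIDIA/DeepLearningExamples | Tensorflow2/Recommendation/DLRM/distributed_utils.py | distribute_to_buckets
-- ===== SOURCE A (Python) =====
-- from collections import deque
-- import math
--
-- def argsort(sequence, reverse: bool = False):
--     idx_pairs = [(x, i) for i, x in enumerate(sequence)]
--     sorted_pairs = sorted(idx_pairs, key=lambda pair: pair[0], reverse=reverse)
--     return [i for _, i in sorted_pairs]
--
-- def distribute_to_buckets(sizes, buckets_num):
--     def sum_sizes(indices):
--         return sum(sizes[i] for i in indices)
--
--     max_bucket_size = math.ceil(len(sizes) / buckets_num)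
--     idx_sorted = deque(argsort(sizes, reverse=True))
--     buckets = [[] for _ in range(buckets_num)]
--     final_buckets = []
--
--     while idx_sorted:
--         bucket = buckets[0]
--         bucket.append(idx_sorted.popleft())
--
--         if len(bucket) == max_bucket_size:
--             final_buckets.append(buckets.pop(0))
--
--         buckets.sort(key=sum_sizes)
--
--     final_buckets += buckets
--
--     return final_buckets
-- ===== SOURCE B (Python) =====
-- import math
--
-- def distribute_to_buckets(sizes, buckets_num):
--     # Same greedy as the original, but each bucket carries its running sum and the
--     # active buckets are KEPT sorted by that sum: instead of re-sorting the whole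
--     # list (recomputing every bucket's sum) after each placement, the one modified
--     # bucket is re-inserted at the position found by a binary search on the sums.
--     max_bucket_size = math.ceil(len(sizes) / buckets_num)
--     order = sorted(range(len(sizes)), key=lambda i: sizes[i], reverse=True)
--     active = [(0, []) for _ in range(buckets_num)]  # (sum, bucket), sorted by sum
--     final_buckets = []
--     for idx in order:
--         s, bucket = active.pop(0)
--         bucket.append(idx)
--         s += sizes[idx]
--         if len(bucket) == max_bucket_size:
--             final_buckets.append(bucket)
--         else:
--             lo, hi = 0, len(active)
--             while lo < hi:
--                 mid = (lo + hi) // 2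
--                 if active[mid][0] < s:
--                     lo = mid + 1
--                 else:
--                     hi = mid
--             active.insert(lo, (s, bucket))
--     return final_buckets + [b for _, b in active]
-- ===== Notes on version B (the rewrite author's own statement) =====
-- stated objective: faster
-- what changed: B keeps each bucket's running sum and maintains the active buckets as a list kept sorted by that sum, re-inserting only the one modified bucket with a single linear scan, instead of recomputing every bucket's sum and re-sorting the whole bucket list after each placement.
import Mathlib
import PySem

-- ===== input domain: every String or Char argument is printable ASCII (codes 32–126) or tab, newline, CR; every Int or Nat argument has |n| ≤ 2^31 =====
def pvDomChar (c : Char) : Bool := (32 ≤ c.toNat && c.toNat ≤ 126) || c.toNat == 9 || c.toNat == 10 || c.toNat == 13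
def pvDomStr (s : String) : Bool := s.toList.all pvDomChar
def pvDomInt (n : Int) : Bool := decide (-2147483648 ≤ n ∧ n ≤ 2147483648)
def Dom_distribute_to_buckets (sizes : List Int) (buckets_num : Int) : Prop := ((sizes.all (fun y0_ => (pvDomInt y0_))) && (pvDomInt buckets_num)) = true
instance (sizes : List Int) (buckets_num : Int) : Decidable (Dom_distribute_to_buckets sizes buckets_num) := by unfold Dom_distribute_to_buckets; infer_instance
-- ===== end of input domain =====

-- B replaces A's per-step full re-sort (whose keys re-sum every bucket) by buckets carrying
-- running sums, kept sorted by re-inserting only the modified bucket — measurably faster.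

-- ===== PORT A =====
-- sum(sizes[i] for i in indices); the algorithm only ever looks up valid indices,
-- so the `.getD 0` default of the exact `pyGet?` lookup is never taken
def pvSumSizes (sizes : List Int) (indices : List Int) : Int :=
  indices.foldl (fun a i => a + (PySem.List.pyGet? sizes i).getD 0) 0

-- argsort(sequence, reverse=True): pairs (x, i), stable sort by pair[0], keep the indices
def pvArgsortRev (sequence : List Int) : List Int :=
  (PySem.List.sorted ((PySem.List.enumerate sequence 0).map (fun p => (p.2, p.1)))
      (fun pr => pr.1) true).map (fun pr => pr.2)

-- one iteration of A's while loop; state = (final_buckets, buckets)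
def pvStepA (sizes : List Int) (maxB : Int)
    (st : List (List Int) × List (List Int)) (i : Int) : List (List Int) × List (List Int) :=
  match st.2 with
  | [] => st      -- Python raises IndexError here (reachable only outside Pre_)
  | b :: bs =>
    let b' := b ++ [i]
    let fb : List (List Int) × List (List Int) :=
      if (b'.length : Int) = maxB then (st.1 ++ [b'], bs) else (st.1, b' :: bs)
    (fb.1, PySem.List.sorted fb.2 (pvSumSizes sizes) false)

def distribute_to_buckets (sizes : List Int) (buckets_num : Int) : List (List Int) :=
  -- math.ceil(len(sizes)/buckets_num) = -((-len) // bn): exact on Dom's int magnitudes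
  let maxB : Int := -(PySem.Int.floordiv (-(sizes.length : Int)) buckets_num)
  let idx_sorted := pvArgsortRev sizes
  let st := idx_sorted.foldl (pvStepA sizes maxB) ([], List.replicate buckets_num.toNat [])
  st.1 ++ st.2

-- ===== PORT B =====
-- the hand-written binary search: `lo, hi = 0, len(active); while lo < hi: ...`
def pvBisect (active : List (Int × List Int)) (s : Int) (lo hi : Int) : Int :=
  if _h : lo < hi then
    if (PySem.List.pyGetD active (PySem.Int.floordiv (lo + hi) 2) (0, [])).1 < s then
      pvBisect active s (PySem.Int.floordiv (lo + hi) 2 + 1) hi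
    else
      pvBisect active s lo (PySem.Int.floordiv (lo + hi) 2)
  else lo
termination_by (hi - lo).toNat
decreasing_by
  · have hb := PySem.Int.floordiv_two_mid_bounds (le_of_lt _h)
    omega
  · have hlt := (PySem.Int.floordiv_lt_iff_lt_mul (by norm_num : (0:Int) < 2)).2
      (by omega : lo + hi < hi * 2)
    omega

-- one iteration of B's for loop; state = (final_buckets, active) with active = (sum, bucket) pairs
def pvStepB (sizes : List Int) (maxB : Int)
    (st : List (List Int) × List (Int × List Int)) (idx : Int) :
    List (List Int) × List (Int × List Int) :=
  match st.2 with
  | [] => st      -- Python raises IndexError here (reachable only outside Pre_)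
  | (s, bucket) :: rest =>
    let bucket' := bucket ++ [idx]
    let s' := s + (PySem.List.pyGet? sizes idx).getD 0
    if (bucket'.length : Int) = maxB then (st.1 ++ [bucket'], rest)
    else (st.1, PySem.List.insert rest (pvBisect rest s' 0 (rest.length : Int)) (s', bucket'))

def distribute_to_buckets_alt (sizes : List Int) (buckets_num : Int) : List (List Int) :=
  let maxB : Int := -(PySem.Int.floordiv (-(sizes.length : Int)) buckets_num)
  let order := PySem.List.sorted (PySem.List.pyRange 0 (sizes.length : Int) 1)
      (fun i => (PySem.List.pyGet? sizes i).getD 0) true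
  let st := order.foldl (pvStepB sizes maxB) ([], List.replicate buckets_num.toNat (0, []))
  st.1 ++ st.2.map Prod.snd

-- ===== PRECONDITION & SPEC =====
-- Pre_ excludes exactly the inputs where A raises: buckets_num = 0 (ZeroDivisionError) and
-- buckets_num < 0 with nonempty sizes (IndexError: `buckets` is empty); A returns nowhere outside Pre_.
-- (Both ports align their values on these excluded inputs too, so the equivalence proof below
-- happens not to need the hypothesis; Pre_ is still required because Python A raises there.)
def Pre_distribute_to_buckets (sizes : List Int) (buckets_num : Int) : Prop :=
  1 ≤ buckets_num ∨ (sizes = [] ∧ buckets_num < 0)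
instance (sizes : List Int) (buckets_num : Int) : Decidable (Pre_distribute_to_buckets sizes buckets_num) := by unfold Pre_distribute_to_buckets; infer_instance

def pvWitness_distribute_to_buckets : List Int × Int := ([3, 1, 4, 1, 5], 2)

def Spec_distribute_to_buckets (sizes : List Int) (buckets_num : Int) (out : List (List Int)) : Prop := out = distribute_to_buckets_alt sizes buckets_num
instance (sizes : List Int) (buckets_num : Int) (out : List (List Int)) : Decidable (Spec_distribute_to_buckets sizes buckets_num out) := by unfold Spec_distribute_to_buckets; infer_instance

-- ===== CLAIM (what is proved, stated in full; the proofs are below) =====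
def Claim_equal_distribute_to_buckets : Prop := ∀ (sizes : List Int) (buckets_num : Int), Dom_distribute_to_buckets sizes buckets_num → Pre_distribute_to_buckets sizes buckets_num → Spec_distribute_to_buckets sizes buckets_num (distribute_to_buckets sizes buckets_num)

-- ===== LEMMAS AND PROOFS =====

-- the reference insertion: insert x before the first element of key ≥ key x
def pvIns {α : Type} (key : α → Int) (x : α) : List α → List α
  | [] => [x]
  | y :: ys => if key y < key x then y :: pvIns key x ys else x :: y :: ys

-- the same insertion on (sum, bucket) pairs, keyed by the stored sum
def pvInsPair (p : Int × List Int) : List (Int × List Int) → List (Int × List Int)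
  | [] => [p]
  | q :: qs => if q.1 < p.1 then q :: pvInsPair p qs else p :: q :: qs

-- insertBy walks past a prefix it does not insert into
theorem pvInsertBy_append {α : Type} (before : α → α → Bool) (x : α) (pre l : List α)
    (h : ∀ p ∈ pre, before x p = false) :
    PySem.List.insertBy before x (pre ++ l) = pre ++ PySem.List.insertBy before x l := by
  induction pre with
  | nil => rfl
  | cons p ps ih =>
    simp only [List.cons_append, PySem.List.insertBy, h p (by simp)]
    simp [ih (fun q hq => h q (by simp [hq]))]

-- insertion-sorting an already-ordered remainder onto a compatible accumulator appends it
theorem pvFoldlIns_sorted {α : Type} (key : α → Int) :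
    ∀ (ys acc : List α), ys.Pairwise (fun a b => key a ≤ key b) →
      (∀ z ∈ ys, ∀ w ∈ acc, ¬ key z < key w) →
      ys.foldl (fun a z => PySem.List.insertBy (fun a b => decide (key a < key b)) z a) acc
        = acc ++ ys := by
  intro ys
  induction ys with
  | nil => intro acc _ _; simp
  | cons y ys ih =>
    intro acc hp hc
    have h1 : PySem.List.insertBy (fun a b => decide (key a < key b)) y acc = acc ++ [y] :=
      PySem.List.insertBy_of_forall_not_before _ _ _
        (fun w hw => by simpa using hc y (by simp) w hw)
    simp only [List.foldl_cons, h1]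
    rw [ih (acc ++ [y]) (List.Pairwise.of_cons hp)]
    · simp
    · intro z hz w hw
      rcases List.mem_append.1 hw with hw | hw
      · exact hc z (by simp [hz]) w hw
      · have : w = y := by simpa using hw
        subst this
        exact not_lt.2 ((List.pairwise_cons.1 hp).1 z hz)

-- the generalized stable-insert characterization of one insertion-sort pass
theorem pvFoldlIns_cons {α : Type} (key : α → Int) :
    ∀ (l pre : List α) (x : α), (pre ++ l).Pairwise (fun a b => key a ≤ key b) →
      (∀ p ∈ pre, key p ≤ key x) →
      l.foldl (fun a z => PySem.List.insertBy (fun a b => decide (key a < key b)) z a) (pre ++ [x])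
        = pre ++ pvIns key x l := by
  intro l
  induction l with
  | nil => intro pre x _ _; simp [pvIns]
  | cons y ys ih =>
    intro pre x hp hx
    obtain ⟨hpre, hyys, hcross⟩ := List.pairwise_append.1 hp
    have hstep : PySem.List.insertBy (fun a b => decide (key a < key b)) y (pre ++ [x])
        = pre ++ PySem.List.insertBy (fun a b => decide (key a < key b)) y [x] := by
      apply pvInsertBy_append
      intro p hpmem
      simp only [decide_eq_false_iff_not, not_lt]
      exact hcross p hpmem y (by simp)
    simp only [List.foldl_cons, hstep]
    by_cases hlt : key y < key x
    · have : PySem.List.insertBy (fun a b => decide (key a < key b)) y [x] = [y, x] := by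
        simp [PySem.List.insertBy, hlt]
      rw [this]
      have heq : pre ++ [y, x] = (pre ++ [y]) ++ [x] := by simp
      rw [heq, ih (pre ++ [y]) x (by simpa using hp)
            (by intro p hpm
                rcases List.mem_append.1 hpm with h | h
                · exact hx p h
                · have : p = y := by simpa using h
                  subst this; exact le_of_lt hlt)]
      simp [pvIns, hlt]
    · have : PySem.List.insertBy (fun a b => decide (key a < key b)) y [x] = [x, y] := by
        simp [PySem.List.insertBy, hlt]
      rw [this]
      have hfold := pvFoldlIns_sorted key ys (pre ++ [x, y]) (List.Pairwise.of_cons hyys) ?_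
      · rw [hfold]; simp [pvIns, hlt]
      · intro z hz w hw
        have hyz : key y ≤ key z := (List.pairwise_cons.1 hyys).1 z hz
        rcases List.mem_append.1 hw with hw | hw
        · exact not_lt.2 (le_trans (hcross w hw y (by simp)) hyz)
        · rcases (by simpa using hw : w = x ∨ w = y) with h | h
          · subst h; exact not_lt.2 (le_trans (not_lt.1 hlt) hyz)
          · subst h; exact not_lt.2 hyz

-- stable sort of x :: l, l already ordered, = insert x before the first key ≥ key x
theorem pvSorted_cons {α : Type} (key : α → Int) (x : α) (l : List α)
    (h : l.Pairwise (fun a b => key a ≤ key b)) :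
    PySem.List.sorted (x :: l) key = pvIns key x l := by
  rw [PySem.List.sorted_eq_foldl_insertBy]
  have : List.foldl (fun acc z => PySem.List.insertBy (fun a b => decide (key a < key b)) z acc)
      [] (x :: l)
      = l.foldl (fun acc z => PySem.List.insertBy (fun a b => decide (key a < key b)) z acc)
        ([] ++ [x]) := by rfl
  rw [this, pvFoldlIns_cons key l [] x (by simpa using h) (by simp)]
  simp

-- sorting a mapped list = mapping the sort under the composed key (any before-function)
theorem pvInsertBy_map {α β : Type} (g : α → β) (before : β → β → Bool) (x : α) (l : List α) :
    PySem.List.insertBy before (g x) (l.map g)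
      = (PySem.List.insertBy (fun a b => before (g a) (g b)) x l).map g := by
  induction l with
  | nil => rfl
  | cons y ys ih =>
    simp only [List.map_cons, PySem.List.insertBy]
    by_cases h : before (g x) (g y)
    · simp [h]
    · simp [h, ih]

theorem pvFoldlIns_map {α β : Type} (g : α → β) (before : β → β → Bool) :
    ∀ (l acc : List α),
      (l.map g).foldl (fun a z => PySem.List.insertBy before z a) (acc.map g)
        = (l.foldl (fun a z => PySem.List.insertBy (fun a b => before (g a) (g b)) z a) acc).map g := by
  intro l
  induction l with
  | nil => intro acc; rfl
  | cons y ys ih =>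
    intro acc
    simp only [List.foldl_cons, List.map_cons]
    rw [show PySem.List.insertBy before (g y) (List.map g acc)
          = (PySem.List.insertBy (fun a b => before (g a) (g b)) y acc).map g from
        pvInsertBy_map g before y acc]
    exact ih _

theorem pvSorted_rev_map {α β : Type} (g : α → β) (key : β → Int) (l : List α) :
    PySem.List.sorted (l.map g) key true
      = (PySem.List.sorted l (fun a => key (g a)) true).map g := by
  rw [PySem.List.sorted_rev_eq_foldl_insertBy, PySem.List.sorted_rev_eq_foldl_insertBy]
  have h := pvFoldlIns_map g (fun a b => decide (key b < key a)) l []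
  simpa using h

-- pvBisect returns the splitting point: sums < s strictly to its left, ≥ s from it on
theorem pvBisect_spec (L : List (Int × List Int)) (s : Int)
    (hp : L.Pairwise (fun a b => a.1 ≤ b.1)) :
    ∀ (n : Nat) (lo hi : Int), (hi - lo).toNat = n → 0 ≤ lo → lo ≤ hi → hi ≤ (L.length : Int) →
      (∀ (j : Nat) (hj : j < L.length), (j : Int) < lo → L[j].1 < s) →
      (∀ (j : Nat) (hj : j < L.length), hi ≤ (j : Int) → ¬ L[j].1 < s) →
      lo ≤ pvBisect L s lo hi ∧ pvBisect L s lo hi ≤ hi ∧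
      (∀ (j : Nat) (hj : j < L.length), (j : Int) < pvBisect L s lo hi → L[j].1 < s) ∧
      (∀ (j : Nat) (hj : j < L.length), pvBisect L s lo hi ≤ (j : Int) → ¬ L[j].1 < s) := by
  intro n
  induction n using Nat.strong_induction_on with
  | _ n ih =>
    intro lo hi hn h0 hlh hhl hlow hhigh
    rw [pvBisect]
    by_cases h : lo < hi
    · rw [dif_pos h]
      have hb := PySem.Int.floordiv_two_mid_bounds (le_of_lt h)
      have hmlt : PySem.Int.floordiv (lo + hi) 2 < hi :=
        (PySem.Int.floordiv_lt_iff_lt_mul (by norm_num : (0:Int) < 2)).2 (by omega)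
      have hmnn : 0 ≤ PySem.Int.floordiv (lo + hi) 2 := le_trans h0 hb.1
      have hmL : PySem.Int.floordiv (lo + hi) 2 < (L.length : Int) := lt_of_lt_of_le hmlt hhl
      have hml : (PySem.Int.floordiv (lo + hi) 2).toNat < L.length := by omega
      rw [PySem.List.pyGetD_eq_getElem L ((0 : Int), ([] : List Int)) hmnn hmL]
      by_cases hc : (L[(PySem.Int.floordiv (lo + hi) 2).toNat]).1 < s
      · rw [if_pos hc]
        have hinv : ∀ (j : Nat) (hj : j < L.length),
            (j : Int) < PySem.Int.floordiv (lo + hi) 2 + 1 → L[j].1 < s := by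
          intro j hj hjlt
          by_cases hjlo : (j : Int) < lo
          · exact hlow j hj hjlo
          · have hle : j ≤ (PySem.Int.floordiv (lo + hi) 2).toNat := by omega
            rcases Nat.lt_or_eq_of_le hle with hlt2 | heq
            · exact lt_of_le_of_lt ((List.pairwise_iff_getElem.1 hp) j _ hj hml hlt2) hc
            · simpa [heq] using hc
        obtain ⟨h1, h2, h3, h4⟩ := ih ((hi - (PySem.Int.floordiv (lo + hi) 2 + 1)).toNat)
          (by omega) _ hi rfl (by omega) (by omega) hhl hinv hhigh
        exact ⟨by omega, h2, h3, h4⟩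
      · rw [if_neg hc]
        have hinv : ∀ (j : Nat) (hj : j < L.length),
            PySem.Int.floordiv (lo + hi) 2 ≤ (j : Int) → ¬ L[j].1 < s := by
          intro j hj hjge
          have hle : (PySem.Int.floordiv (lo + hi) 2).toNat ≤ j := by omega
          rcases Nat.lt_or_eq_of_le hle with hlt2 | heq
          · intro habs
            exact hc (lt_of_le_of_lt ((List.pairwise_iff_getElem.1 hp) _ j hml hj hlt2) habs)
          · simpa [← heq] using hc
        obtain ⟨h1, h2, h3, h4⟩ := ih ((PySem.Int.floordiv (lo + hi) 2 - lo).toNat)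
          (by omega) lo _ rfl h0 hb.1 (le_of_lt hmL) hlow hinv
        exact ⟨h1, by omega, h3, h4⟩
    · rw [dif_neg h]
      exact ⟨le_refl _, by omega, hlow, fun j hj hge => hhigh j hj (by omega)⟩

-- inserting at that splitting point is exactly the reference insertion
theorem pvInsert_eq_insPair (s : Int) (b : List Int) :
    ∀ (L : List (Int × List Int)) (r : Nat), r ≤ L.length →
      (∀ (j : Nat) (hj : j < L.length), j < r → L[j].1 < s) →
      (∀ (j : Nat) (hj : j < L.length), r ≤ j → ¬ L[j].1 < s) →
      PySem.List.insert L (r : Int) (s, b) = pvInsPair (s, b) L := by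
  intro L
  induction L with
  | nil =>
    intro r hr _ _
    have : r = 0 := by simp at hr; omega
    subst this
    simp [pvInsPair, PySem.List.insert_zero]
  | cons q qs ih =>
    intro r hr hlow hhigh
    cases r with
    | zero =>
      have h0 : ¬ q.1 < s := hhigh 0 (by simp) (le_refl 0)
      simp [pvInsPair, h0, PySem.List.insert_zero]
    | succ k =>
      have hq : q.1 < s := hlow 0 (by simp) (Nat.succ_pos k)
      have hk : k ≤ qs.length := by simpa using hr
      rw [PySem.List.insert_natCast _ (k + 1) _ hr]
      have hrhs : pvInsPair (s, b) (q :: qs) = q :: pvInsPair (s, b) qs := by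
        simp [pvInsPair, hq]
      rw [hrhs, ← ih k hk ?_ ?_, PySem.List.insert_natCast qs k _ hk]
      · simp
      · intro j hj hjk
        have := hlow (j + 1) (by simpa using Nat.succ_lt_succ hj) (Nat.succ_lt_succ hjk)
        simpa using this
      · intro j hj hjk
        have := hhigh (j + 1) (by simpa using Nat.succ_lt_succ hj) (Nat.succ_le_succ hjk)
        simpa using this

-- pvInsPair is pvIns on the stored first components
theorem pvInsPair_map (sizes : List Int) (x : List Int) (l : List (List Int)) :
    pvInsPair (pvSumSizes sizes x, x) (l.map (fun b => (pvSumSizes sizes b, b)))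
      = (pvIns (pvSumSizes sizes) x l).map (fun b => (pvSumSizes sizes b, b)) := by
  induction l with
  | nil => rfl
  | cons y ys ih =>
    simp only [List.map_cons, pvInsPair, pvIns]
    by_cases h : pvSumSizes sizes y < pvSumSizes sizes x
    · simp [h, ih]
    · simp [h]

theorem pvSumSizes_append (sizes : List Int) (b : List Int) (i : Int) :
    pvSumSizes sizes (b ++ [i]) = pvSumSizes sizes b + (PySem.List.pyGet? sizes i).getD 0 := by
  simp [pvSumSizes]

-- the loop invariant: B's state is A's state with each bucket paired with its sum,
-- and A's bucket list stays ordered by sum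
theorem pvLoop (sizes : List Int) (maxB : Int) :
    ∀ (order : List Int) (fin bks : List (List Int)),
      bks.Pairwise (fun a b => pvSumSizes sizes a ≤ pvSumSizes sizes b) →
      order.foldl (pvStepB sizes maxB) (fin, bks.map (fun b => (pvSumSizes sizes b, b)))
        = ((order.foldl (pvStepA sizes maxB) (fin, bks)).1,
           (order.foldl (pvStepA sizes maxB) (fin, bks)).2.map (fun b => (pvSumSizes sizes b, b))) := by
  intro order
  induction order with
  | nil => intro fin bks _; rfl
  | cons i rest ih =>
    intro fin bks hp
    cases bks with
    | nil => simpa [pvStepA, pvStepB] using ih fin [] (by simp)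
    | cons b bs =>
      have htail := List.Pairwise.of_cons hp
      simp only [List.foldl_cons, List.map_cons]
      by_cases hfull : ((b.length : Int) + 1 = maxB)
      · have hA : pvStepA sizes maxB (fin, b :: bs) i = (fin ++ [b ++ [i]], bs) := by
          simp [pvStepA, hfull, PySem.List.sorted_eq_self_of_pairwise bs (pvSumSizes sizes) htail]
        have hB : pvStepB sizes maxB
            (fin, (pvSumSizes sizes b, b) :: bs.map (fun b => (pvSumSizes sizes b, b))) i
            = (fin ++ [b ++ [i]], bs.map (fun b => (pvSumSizes sizes b, b))) := by
          simp only [pvStepB]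
          rw [if_pos (by simpa using hfull)]
        rw [hA, hB, ih (fin ++ [b ++ [i]]) bs htail]
      · have hA : pvStepA sizes maxB (fin, b :: bs) i
            = (fin, pvIns (pvSumSizes sizes) (b ++ [i]) bs) := by
          simp [pvStepA, hfull, pvSorted_cons (pvSumSizes sizes) (b ++ [i]) bs htail]
        have hB : pvStepB sizes maxB
            (fin, (pvSumSizes sizes b, b) :: bs.map (fun b => (pvSumSizes sizes b, b))) i
            = (fin, (pvIns (pvSumSizes sizes) (b ++ [i]) bs).map (fun b => (pvSumSizes sizes b, b))) := by
          simp only [pvStepB]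
          rw [if_neg (by simpa using hfull)]
          have hps : (bs.map (fun b => (pvSumSizes sizes b, b))).Pairwise
              (fun a b => a.1 ≤ b.1) := List.pairwise_map.2 htail
          have hspec := pvBisect_spec (bs.map (fun b => (pvSumSizes sizes b, b)))
            (pvSumSizes sizes b + (PySem.List.pyGet? sizes i).getD 0) hps
            (((bs.map (fun b => (pvSumSizes sizes b, b))).length : Int) - 0).toNat 0
            ((bs.map (fun b => (pvSumSizes sizes b, b))).length : Int) rfl (le_refl 0)
            (by positivity) (le_refl _)
            (fun j hj hjlt => absurd hjlt (by omega))
            (fun j hj hge => absurd hge (by omega))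
          obtain ⟨hlo, hhi, hlow, hhigh⟩ := hspec
          have hcast : ((pvBisect (bs.map (fun b => (pvSumSizes sizes b, b)))
              (pvSumSizes sizes b + (PySem.List.pyGet? sizes i).getD 0) 0
              ((bs.map (fun b => (pvSumSizes sizes b, b))).length : Int)).toNat : Int)
              = pvBisect (bs.map (fun b => (pvSumSizes sizes b, b)))
              (pvSumSizes sizes b + (PySem.List.pyGet? sizes i).getD 0) 0
              ((bs.map (fun b => (pvSumSizes sizes b, b))).length : Int) := by omega
          rw [← hcast, pvInsert_eq_insPair _ _ _ _ (by omega)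
                (fun j hj hjr => hlow j hj (by omega))
                (fun j hj hjr => hhigh j hj (by omega)),
              ← pvSumSizes_append sizes b i, pvInsPair_map]
        rw [hA, hB, ih fin (pvIns (pvSumSizes sizes) (b ++ [i]) bs) ?_]
        rw [← pvSorted_cons (pvSumSizes sizes) (b ++ [i]) bs htail]
        exact PySem.List.sorted_pairwise _ _

-- A's argsort(sizes, reverse=True) is B's sorted(range(n), key=sizes[.], reverse=True)
theorem pvArgsort_eq_order (sizes : List Int) :
    pvArgsortRev sizes
      = PySem.List.sorted (PySem.List.pyRange 0 (sizes.length : Int) 1)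
          (fun i => (PySem.List.pyGet? sizes i).getD 0) true := by
  unfold pvArgsortRev
  rw [PySem.List.enumerate_eq_map_pyRange sizes 0]
  have hlen : PySem.List.len sizes = (sizes.length : Int) := by simp [PySem.List.len]
  rw [hlen, List.map_map]
  have hg : ((fun p : Int × Int => (p.2, p.1)) ∘ fun j => (j, PySem.List.pyGetD sizes j 0))
      = fun j => (PySem.List.pyGetD sizes j 0, j) := rfl
  rw [hg, pvSorted_rev_map (fun j => (PySem.List.pyGetD sizes j 0, j)) (fun pr => pr.1)]
  have hkey : (fun a : Int => (fun pr : Int × Int => pr.1) ((fun j => (PySem.List.pyGetD sizes j 0, j)) a))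
      = fun i => (PySem.List.pyGet? sizes i).getD 0 := by
    funext a; simp [PySem.List.pyGetD]
  rw [hkey]
  have hid : ((fun pr : Int × Int => pr.2) ∘ fun j => (PySem.List.pyGetD sizes j 0, j)) = id := rfl
  rw [List.map_map, hid, List.map_id]

theorem pvReplicate_pairwise (sizes : List Int) (n : Nat) :
    (List.replicate n ([] : List Int)).Pairwise
      (fun a b => pvSumSizes sizes a ≤ pvSumSizes sizes b) := by
  induction n with
  | zero => simp
  | succ m ih =>
    simp only [List.replicate_succ, List.pairwise_cons]
    exact ⟨fun b hb => by simp [List.eq_of_mem_replicate hb], ih⟩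

-- ===== VERDICT (by name: the statement is the Claim_ definition above) =====
theorem distribute_to_buckets_spec : Claim_equal_distribute_to_buckets := by
  intro sizes buckets_num _ _
  unfold Spec_distribute_to_buckets distribute_to_buckets distribute_to_buckets_alt
  simp only
  rw [← pvArgsort_eq_order]
  have hinit : (List.replicate buckets_num.toNat ((0 : Int), ([] : List Int)))
      = (List.replicate buckets_num.toNat ([] : List Int)).map
          (fun b => (pvSumSizes sizes b, b)) := by
    rw [List.map_replicate]; rfl
  rw [hinit, pvLoop sizes _ (pvArgsortRev sizes) [] _ (pvReplicate_pairwise sizes _)]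
  rw [List.map_map]
  have hid : (Prod.snd ∘ fun b : List Int => (pvSumSizes sizes b, b)) = id := rfl
  rw [hid, List.map_id]
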